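-- pv_equiv track=rewrite | github.com/takekoputa/project-euler | 4th_100/problem367.py | construct_representative_seq
-- ===== SOURCE A (Python) =====
-- def get_permutation(seq, permutation_index):
--     p = [0] * len(seq)
--     for p_i, seq_i in enumerate(permutation_index):
--         p[p_i] = seq[seq_i]
--     return p
--
-- def left_rotate_by_k(seq, k):
--     return seq[k:] + seq[:k]
--
-- def construct_representative_seq(cycle_length_freq):
--     seq = []
--
--     cycle_lengths = []
--     for length, freq in enumerate(cycle_length_freq):
--         for i in range(freq):
--             cycle_lengths.append(length)
--
--     first_index = 0
--
--     for length in cycle_lengths: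
--         seq += get_permutation(list(range(first_index, first_index + length)), left_rotate_by_k(list(range(length)), k=1))
--         first_index += length
--
--     return seq
-- ===== SOURCE B (Python) =====
-- def construct_representative_seq(cycle_length_freq):
--     # Pass 1: record each non-empty block's (start, length) and the total element count.
--     blocks = []
--     total = 0
--     for length, freq in enumerate(cycle_length_freq):
--         if length > 0 and freq > 0:
--             blocks.extend((total + r * length, length) for r in range(freq))
--             total += length * freq
--     # Pass 2: fill seq with index+1 everywhere, then patch each block's last slot
--     # with the block's start (the left-rotation wrap-around).
--     seq = list(range(1, total + 1))
--     for start, length in blocks: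
--         seq[start + length - 1] = start
--     return seq
-- ===== Notes on version B (the rewrite author's own statement) =====
-- stated objective: alternative
-- what changed: A builds the sequence by concatenating, per cycle, a rotated range computed through get_permutation/left_rotate_by_k; B records each non-empty block's (start, length) once per (length, freq) group, fills seq directly with list(range(1, total+1)) and then patches only each block's last slot with its start.
import Mathlib
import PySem

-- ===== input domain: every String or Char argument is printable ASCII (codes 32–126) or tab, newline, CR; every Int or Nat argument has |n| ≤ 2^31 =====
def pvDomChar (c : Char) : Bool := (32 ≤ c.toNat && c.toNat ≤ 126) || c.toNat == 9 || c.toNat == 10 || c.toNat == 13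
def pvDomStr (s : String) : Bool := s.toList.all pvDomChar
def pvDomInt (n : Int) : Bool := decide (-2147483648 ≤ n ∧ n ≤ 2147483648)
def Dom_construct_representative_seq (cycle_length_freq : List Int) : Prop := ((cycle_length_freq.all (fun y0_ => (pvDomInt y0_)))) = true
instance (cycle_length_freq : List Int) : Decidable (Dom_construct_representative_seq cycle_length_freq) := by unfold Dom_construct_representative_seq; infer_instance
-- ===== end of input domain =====

-- B replaces A's per-cycle rotate-and-concatenate build by a fill-then-patch construction:
-- fill seq with index+1 and overwrite only each block's last slot (objective: alternative).

-- ===== PORT A =====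
-- get_permutation: p[p_i] = seq[seq_i]; at every call site the indices are in range,
-- so the total forms pySetD/pyGetD are exact there.
def pvGetPermutation (seq permutation_index : List Int) : List Int :=
  (PySem.List.enumerate permutation_index 0).foldl
    (fun p pi => PySem.List.pySetD p pi.1 (PySem.List.pyGetD seq pi.2 0))
    (List.replicate seq.length 0)

def pvLeftRotateByK (seq : List Int) (k : Int) : List Int :=
  PySem.List.slice seq (some k) none ++ PySem.List.slice seq none (some k)

def construct_representative_seq (cycle_length_freq : List Int) : List Int :=
  let cycle_lengths :=
    (PySem.List.enumerate cycle_length_freq 0).foldl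
      (fun acc lf => acc ++ (PySem.List.pyRange 0 lf.2 1).map (fun _ => lf.1)) ([] : List Int)
  let res := cycle_lengths.foldl
    (fun st length =>
      (st.1 ++ pvGetPermutation (PySem.List.pyRange st.2 (st.2 + length) 1)
                 (pvLeftRotateByK (PySem.List.pyRange 0 length 1) 1),
       st.2 + length))
    (([] : List Int), (0 : Int))
  res.1

-- ===== PORT B =====
-- seq[start + length - 1] = start: the index is nonnegative and in range for every
-- recorded block, so the total form pySetD is exact there.
def construct_representative_seq_alt (cycle_length_freq : List Int) : List Int :=
  let bt :=
    (PySem.List.enumerate cycle_length_freq 0).foldl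
      (fun (bt : List (Int × Int) × Int) lf =>
        if 0 < lf.1 ∧ 0 < lf.2 then
          (bt.1 ++ (PySem.List.pyRange 0 lf.2 1).map (fun r => (bt.2 + r * lf.1, lf.1)),
           bt.2 + lf.1 * lf.2)
        else bt)
      (([] : List (Int × Int)), (0 : Int))
  let seq := PySem.List.pyRange 1 (bt.2 + 1) 1
  bt.1.foldl (fun s p => PySem.List.pySetD s (p.1 + p.2 - 1) p.1) seq

-- ===== PRECONDITION & SPEC =====
def Spec_construct_representative_seq (cycle_length_freq : List Int) (out : List Int) : Prop := out = construct_representative_seq_alt cycle_length_freq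
instance (cycle_length_freq : List Int) (out : List Int) : Decidable (Spec_construct_representative_seq cycle_length_freq out) := by unfold Spec_construct_representative_seq; infer_instance

-- ===== CLAIM (what is proved, stated in full; the proofs are below) =====
def Claim_equal_construct_representative_seq : Prop := ∀ (cycle_length_freq : List Int), Dom_construct_representative_seq cycle_length_freq → Spec_construct_representative_seq cycle_length_freq (construct_representative_seq cycle_length_freq)

-- ===== LEMMAS AND PROOFS =====

-- One rotated block: [a+1, …, a+L-1, a] for L > 0, empty otherwise.
def pvBlock (a L : Int) : List Int :=
  if L ≤ 0 then [] else PySem.List.pyRange (a + 1) (a + L) 1 ++ [a]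

-- The whole sequence as A builds it, block by block.
def pvFlat (a : Int) : List Int → List Int
  | [] => []
  | L :: t => pvBlock a L ++ pvFlat (a + L) t

-- The (start, length) pairs of the non-empty blocks.
def pvBlocksOf (a : Int) : List Int → List (Int × Int)
  | [] => []
  | L :: t => if L ≤ 0 then pvBlocksOf a t else (a, L) :: pvBlocksOf (a + L) t

lemma pv_getPerm_fold (g : Int → Int) :
    ∀ (perm done rest : List Int), rest.length = perm.length →
    (PySem.List.enumerate perm (done.length : Int)).foldl
      (fun p pi => PySem.List.pySetD p pi.1 (g pi.2)) (done ++ rest) = done ++ perm.map g := by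
  intro perm
  induction perm with
  | nil =>
    intro done rest h
    simp only [List.length_nil] at h
    simp [PySem.List.enumerate_nil, List.eq_nil_of_length_eq_zero h]
  | cons x xs ih =>
    intro done rest h
    cases rest with
    | nil => simp at h
    | cons r rs =>
      rw [PySem.List.enumerate_cons, List.foldl_cons]
      have h1 : PySem.List.pySetD (done ++ r :: rs) ((done.length : Int)) (g x)
          = (done ++ [g x]) ++ rs := by simp
      have h3 : ((done.length : Int) + 1) = ((done ++ [g x]).length : Int) := by
        simp
      rw [h1, h3, ih (done ++ [g x]) rs (by simp at h ⊢; omega)]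
      simp

lemma pv_getPerm_eq (seq perm : List Int) (h : perm.length = seq.length) :
    pvGetPermutation seq perm = perm.map (fun j => PySem.List.pyGetD seq j 0) := by
  unfold pvGetPermutation
  have := pv_getPerm_fold (fun j => PySem.List.pyGetD seq j 0) perm []
      (List.replicate seq.length 0) (by simp [h])
  simpa using this

lemma pv_map_add_pyRange (a s t : Int) :
    (PySem.List.pyRange s t 1).map (fun j => a + j) = PySem.List.pyRange (a + s) (a + t) 1 := by
  rw [PySem.List.pyRange_one, PySem.List.pyRange_one, List.map_map]
  rw [show (a + t) - (a + s) = t - s by ring]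
  apply List.map_congr_left
  intro k _
  simp [Function.comp]
  ring

lemma pv_blockEq (a L : Int) :
    pvGetPermutation (PySem.List.pyRange a (a + L) 1)
      (pvLeftRotateByK (PySem.List.pyRange 0 L 1) 1) = pvBlock a L := by
  by_cases hL : L ≤ 0
  · have e1 : PySem.List.pyRange a (a + L) 1 = [] := PySem.List.pyRange_one_eq_nil (by omega)
    have e2 : PySem.List.pyRange 0 L 1 = [] := PySem.List.pyRange_one_eq_nil (by omega)
    rw [pvLeftRotateByK, e2, PySem.List.slice_from_one, PySem.List.slice_to _ (by norm_num)]
    simp [pvGetPermutation, e1, PySem.List.enumerate_nil, pvBlock, hL]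
  · have hL1 : 0 < L := by omega
    have hrot : pvLeftRotateByK (PySem.List.pyRange 0 L 1) 1
        = PySem.List.pyRange 1 L 1 ++ [0] := by
      rw [pvLeftRotateByK, PySem.List.pyRange_one_cons (by omega)]
      rw [PySem.List.slice_from_one, PySem.List.slice_to _ (by norm_num)]
      simp
    have hlen : (PySem.List.pyRange 1 L 1 ++ [0]).length
        = (PySem.List.pyRange a (a + L) 1).length := by
      simp [PySem.List.length_pyRange_one]; omega
    rw [hrot, pv_getPerm_eq _ _ hlen, List.map_append]
    have hlast : PySem.List.pyGetD (PySem.List.pyRange a (a + L) 1) 0 0 = a := by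
      rw [PySem.List.pyGetD_eq_getElem _ _ (by omega)
        (by rw [PySem.List.length_pyRange_one]; omega)]
      simp [PySem.List.getElem_pyRange_one]
    have hmid : (PySem.List.pyRange 1 L 1).map
        (fun j => PySem.List.pyGetD (PySem.List.pyRange a (a + L) 1) j 0)
        = PySem.List.pyRange (a + 1) (a + L) 1 := by
      rw [← pv_map_add_pyRange a 1 L]
      apply List.map_congr_left
      intro j hj
      rw [PySem.List.mem_pyRange_one] at hj
      rw [PySem.List.pyGetD_eq_getElem _ _ (by omega)
        (by rw [PySem.List.length_pyRange_one]; omega)]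
      simp [PySem.List.getElem_pyRange_one]
      omega
    rw [hmid]
    simp [hlast, pvBlock, hL]

lemma pv_flatA (ls : List Int) :
    ∀ (acc : List Int) (a : Int),
    ls.foldl (fun st L => (st.1 ++ pvBlock st.2 L, st.2 + L)) (acc, a)
      = (acc ++ pvFlat a ls, a + ls.sum) := by
  induction ls with
  | nil => intro acc a; simp [pvFlat]
  | cons L t ih =>
    intro acc a
    rw [List.foldl_cons, ih]
    simp [pvFlat, List.sum_cons, List.append_assoc]
    ring

lemma pv_blocksOf_append (l1 l2 : List Int) (h : ∀ L ∈ l1, 0 ≤ L) :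
    ∀ a, pvBlocksOf a (l1 ++ l2) = pvBlocksOf a l1 ++ pvBlocksOf (a + l1.sum) l2 := by
  induction l1 with
  | nil => intro a; simp [pvBlocksOf]
  | cons L t ih =>
    intro a
    have hL : 0 ≤ L := h L (by simp)
    by_cases hL0 : L ≤ 0
    · have : L = 0 := by omega
      subst this
      simp only [List.cons_append, pvBlocksOf, if_pos (le_refl (0:Int))]
      rw [ih (fun x hx => h x (by simp [hx]))]
      simp
    · simp only [List.cons_append, pvBlocksOf, if_neg hL0]
      rw [ih (fun x hx => h x (by simp [hx]))]
      simp [List.sum_cons, add_assoc]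

lemma pv_grp_replicate (L f : Int) :
    (PySem.List.pyRange 0 f 1).map (fun _ => L) = List.replicate f.toNat L := by
  rw [PySem.List.pyRange_one, List.map_map]
  rw [show ((fun _ => L) ∘ fun k : ℕ => ((0:Int) + k)) = fun _ : ℕ => L from rfl,
    List.map_const', List.length_range]
  norm_num

lemma pv_blocksOf_replicate_zero (n : Nat) : ∀ a, pvBlocksOf a (List.replicate n (0:Int)) = [] := by
  induction n with
  | zero => intro a; simp [pvBlocksOf]
  | succ m ih => intro a; simp only [List.replicate_succ, pvBlocksOf, if_pos (le_refl (0:Int))]; exact ih a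

lemma pv_blocksOf_replicate_pos (L : Int) (hL : 0 < L) (n : Nat) :
    ∀ a, pvBlocksOf a (List.replicate n L) = (List.range n).map (fun k : ℕ => (a + (k : Int) * L, L)) := by
  induction n with
  | zero => intro a; simp [pvBlocksOf]
  | succ m ih =>
    intro a
    rw [List.replicate_succ]
    simp only [pvBlocksOf, if_neg (by omega : ¬ L ≤ 0)]
    rw [ih (a + L), List.range_succ_eq_map, List.map_cons, List.map_map]
    simp only [Nat.cast_zero, zero_mul, add_zero]
    congr 1
    apply List.map_congr_left
    intro k _
    simp only [Function.comp]
    congr 1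
    push_cast
    ring

lemma pv_foldB (lfs : List (Int × Int)) :
    ∀ (bs : List (Int × Int)) (a : Int), (∀ p ∈ lfs, 0 ≤ p.1) →
    lfs.foldl
      (fun (bt : List (Int × Int) × Int) lf =>
        if 0 < lf.1 ∧ 0 < lf.2 then
          (bt.1 ++ (PySem.List.pyRange 0 lf.2 1).map (fun r => (bt.2 + r * lf.1, lf.1)),
           bt.2 + lf.1 * lf.2)
        else bt) (bs, a)
    = (bs ++ pvBlocksOf a (lfs.flatMap (fun lf => (PySem.List.pyRange 0 lf.2 1).map (fun _ => lf.1))),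
       a + (lfs.flatMap (fun lf => (PySem.List.pyRange 0 lf.2 1).map (fun _ => lf.1))).sum) := by
  induction lfs with
  | nil => intro bs a _; simp [pvBlocksOf]
  | cons p t ih =>
    intro bs a h
    obtain ⟨L, f⟩ := p
    have hL : 0 ≤ L := h (L, f) (by simp)
    have hgrp : ∀ x ∈ (PySem.List.pyRange 0 f 1).map (fun _ => L), 0 ≤ x := by
      intro x hx
      rw [List.mem_map] at hx
      obtain ⟨_, _, rfl⟩ := hx
      exact hL
    rw [List.foldl_cons, List.flatMap_cons,
      pv_blocksOf_append _ _ hgrp, List.sum_append]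
    by_cases hg : 0 < L ∧ 0 < f
    · rw [if_pos hg, ih _ _ (fun x hx => h x (by simp [hx]))]
      have hsum : ((PySem.List.pyRange 0 f 1).map (fun _ => (L:Int))).sum = L * f := by
        rw [pv_grp_replicate, List.sum_replicate, nsmul_eq_mul]
        rw [show ((f.toNat : Nat) : Int) = f by omega]
        ring
      have hblocks : (PySem.List.pyRange 0 f 1).map (fun r => (a + r * L, L))
          = pvBlocksOf a ((PySem.List.pyRange 0 f 1).map (fun _ => L)) := by
        rw [pv_grp_replicate, pv_blocksOf_replicate_pos L hg.1, PySem.List.pyRange_one,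
          List.map_map]
        simp [Function.comp]
      rw [hblocks, hsum]
      simp only [Prod.mk.injEq]
      exact ⟨by simp [List.append_assoc], by ring⟩
    · rw [if_neg hg, ih _ _ (fun x hx => h x (by simp [hx]))]
      have hnil : pvBlocksOf a ((PySem.List.pyRange 0 f 1).map (fun _ => (L:Int))) = []
          ∧ ((PySem.List.pyRange 0 f 1).map (fun _ => (L:Int))).sum = 0 := by
        by_cases hf : f ≤ 0
        · rw [PySem.List.pyRange_one_eq_nil (by omega)]
          simp [pvBlocksOf]
        · have : L = 0 := by
            rcases not_and_or.mp hg with h1 | h2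
            · omega
            · omega
          subst this
          rw [pv_grp_replicate]
          exact ⟨pv_blocksOf_replicate_zero _ a, by simp [List.sum_replicate]⟩
      rw [hnil.1, hnil.2]
      simp

lemma pv_patch (ls : List Int) :
    ∀ (pre : List Int) (a : Int), (∀ L ∈ ls, 0 ≤ L) → a = (pre.length : Int) →
    (pvBlocksOf a ls).foldl (fun s p => PySem.List.pySetD s (p.1 + p.2 - 1) p.1)
      (pre ++ PySem.List.pyRange (a + 1) (a + ls.sum + 1) 1)
    = pre ++ pvFlat a ls := by
  induction ls with
  | nil =>
    intro pre a _ _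
    rw [PySem.List.pyRange_one_eq_nil (by simp : a + List.sum ([]:List Int) + 1 ≤ a + 1)]
    simp [pvBlocksOf, pvFlat]
  | cons L t ih =>
    intro pre a h ha
    have hL : 0 ≤ L := h L (by simp)
    have hts : 0 ≤ t.sum := List.sum_nonneg (fun x hx => h x (by simp [hx]))
    have hpre : (0:Int) ≤ a := by omega
    by_cases hL0 : L ≤ 0
    · have hz : L = 0 := by omega
      subst hz
      simp only [pvBlocksOf, pvFlat, pvBlock, if_pos (le_refl (0 : Int))]
      rw [show a + (0 :: t).sum + 1 = a + t.sum + 1 by simp,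
        ih pre a (fun x hx => h x (by simp [hx])) ha]
      simp
    · have hL1 : 0 < L := by omega
      simp only [pvBlocksOf, if_neg hL0, List.foldl_cons, pvFlat]
      have hsplit : PySem.List.pyRange (a + 1) (a + (L :: t).sum + 1) 1
          = (PySem.List.pyRange (a + 1) (a + L) 1 ++ [a + L])
            ++ PySem.List.pyRange (a + L + 1) (a + L + t.sum + 1) 1 := by
        rw [List.sum_cons,
          PySem.List.pyRange_one_append (a + 1) (a + L + 1) (a + (L + t.sum) + 1)
            (by omega) (by omega)]
        congr 1
        · rw [show a + L + 1 = (a + L) + 1 by ring,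
            PySem.List.pyRange_one_succ_right (by omega)]
        · congr 1
          ring
      rw [hsplit]
      have hZ : (PySem.List.pyRange (a + 1) (a + L) 1).length = (L - 1).toNat := by
        rw [PySem.List.length_pyRange_one]
        congr 1
        ring
      have hset : PySem.List.pySetD
            (pre ++ (PySem.List.pyRange (a + 1) (a + L) 1 ++ [a + L]
              ++ PySem.List.pyRange (a + L + 1) (a + L + t.sum + 1) 1)) (a + L - 1) a
          = (pre ++ (PySem.List.pyRange (a + 1) (a + L) 1 ++ [a]))
              ++ PySem.List.pyRange (a + L + 1) (a + L + t.sum + 1) 1 := by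
        rw [PySem.List.pySetD_of_nonneg _ _ (by omega)]
        rw [show pre ++ (PySem.List.pyRange (a + 1) (a + L) 1 ++ [a + L]
              ++ PySem.List.pyRange (a + L + 1) (a + L + t.sum + 1) 1)
            = (pre ++ PySem.List.pyRange (a + 1) (a + L) 1)
              ++ (a + L) :: PySem.List.pyRange (a + L + 1) (a + L + t.sum + 1) 1 by simp]
        rw [show (a + L - 1).toNat = (pre ++ PySem.List.pyRange (a + 1) (a + L) 1).length by
          simp [hZ]; omega]
        simp
      rw [hset, ih (pre ++ (PySem.List.pyRange (a + 1) (a + L) 1 ++ [a])) (a + L)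
        (fun x hx => h x (by simp [hx])) (by simp [hZ]; omega)]
      simp [pvBlock, if_neg hL0, List.append_assoc]


-- ===== VERDICT (by name: the statement is the Claim_ definition above) =====
theorem construct_representative_seq_spec : Claim_equal_construct_representative_seq := by
  intro cf _
  unfold Spec_construct_representative_seq construct_representative_seq construct_representative_seq_alt
  have henum : ∀ p ∈ PySem.List.enumerate cf 0, 0 ≤ p.1 := by
    intro p hp
    rw [PySem.List.mem_enumerate_iff] at hp
    obtain ⟨k, hk, rfl⟩ := hp
    simp
  rw [PySem.List.foldl_append_eq_flatMap, pv_foldB _ _ _ henum]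
  have hlens : ∀ L ∈ (PySem.List.enumerate cf 0).flatMap
      (fun lf => (PySem.List.pyRange 0 lf.2 1).map (fun _ => lf.1)), 0 ≤ L := by
    intro L hL
    rw [List.mem_flatMap] at hL
    obtain ⟨lf, hlf, hm⟩ := hL
    rw [List.mem_map] at hm
    obtain ⟨_, _, rfl⟩ := hm
    exact henum lf hlf
  simp only [pv_blockEq, List.nil_append]
  rw [pv_flatA]
  have hpatch := pv_patch _ [] 0 hlens rfl
  simp only [List.nil_append, zero_add] at hpatch ⊢
  exact hpatch.symm
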